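-- pv_equiv track=rewrite | github.com/mark-powell/advent-of-code-2020 | day18.py | getBracketIndex
-- ===== SOURCE A (Python) =====
-- def getBracketIndex(string):
--     start = -1
--     bracket = 0
--     for i, c in enumerate(string):
--         if c == '(':
--             bracket += 1
--             if start == -1:
--                 start = i
--         if c == ')':
--             bracket -= 1
--             if bracket == 0:
--                 return start+1, i
-- ===== SOURCE B (Python) =====
-- def getBracketIndex(string):
--     start = string.find('(')
--     if start == -1:
--         return None
--     closers = [j for j, c in enumerate(string) if c == ')']
--     for j in closers:
--         prefix = string[:j]
--         if prefix.count('(') == prefix.count(')') + 1: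
--             return (start + 1, j)
--     return None
-- ===== Notes on version B (the rewrite author's own statement) =====
-- stated objective: alternative
-- what changed: B replaces A's single stateful scan (running balance counter plus start bookkeeping) with library-primitive stages: str.find for the first '(', a list comprehension collecting the indices of ')', then a per-candidate test comparing the counts of '(' and ')' in the prefix string[:j]; no running counter is kept at all.
import Mathlib
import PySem

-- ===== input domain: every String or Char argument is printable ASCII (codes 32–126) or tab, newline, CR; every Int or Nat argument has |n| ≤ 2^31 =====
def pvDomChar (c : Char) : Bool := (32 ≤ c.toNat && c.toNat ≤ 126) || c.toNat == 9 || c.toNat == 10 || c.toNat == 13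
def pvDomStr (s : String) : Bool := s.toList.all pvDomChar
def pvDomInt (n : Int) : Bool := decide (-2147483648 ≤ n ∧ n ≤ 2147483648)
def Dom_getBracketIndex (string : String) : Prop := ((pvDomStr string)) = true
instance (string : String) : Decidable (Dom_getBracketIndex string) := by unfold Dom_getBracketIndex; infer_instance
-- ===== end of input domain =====

-- B re-implements the search with library primitives instead of A's running balance counter:
-- str.find locates the first '(', a comprehension collects the indices of ')', and each
-- candidate is tested by comparing counts of '(' and ')' in the prefix before it
-- (alternative decomposition; no speed claim).


-- ===== PORT A =====
-- A's single loop: state (start, bracket); sets start at the first '(' seen,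
-- returns (start+1, i) at the first ')' where bracket becomes 0.
def gbiLoopA : List (Int × Char) → Int → Int → Option (Int × Int)
  | [], _, _ => none
  | (i, c) :: rest, start, bracket =>
      let bracket1 := if c = '(' then bracket + 1 else bracket
      let start1 := if c = '(' ∧ start = -1 then i else start
      if c = ')' then
        if bracket1 - 1 = 0 then some (start1 + 1, i)
        else gbiLoopA rest start1 (bracket1 - 1)
      else gbiLoopA rest start1 bracket1

def getBracketIndex (string : String) : Option (Int × Int) :=
  gbiLoopA (PySem.List.enumerate string.toList) (-1) 0

-- ===== PORT B =====
-- B: 'closers = [j for j, c in enumerate(string) if c == ')']'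
def gbiClosers (l : List (Int × Char)) : List Int :=
  (l.filter (fun p => p.2 == ')')).map (·.1)

-- B's candidate loop: for each closing index j, compare counts of '(' and ')' in string[:j].
def gbiLoopB (s : List Char) (start : Int) : List Int → Option (Int × Int)
  | [] => none
  | j :: rest =>
      let pre := PySem.List.slice s (some 0) (some j)
      if PySem.Chars.count pre ['('] = PySem.Chars.count pre [')'] + 1 then
        some (start + 1, j)
      else gbiLoopB s start rest

def getBracketIndex_alt (string : String) : Option (Int × Int) :=
  let start := PySem.Str.find string "("
  if start = -1 then none
  else gbiLoopB string.toList start (gbiClosers (PySem.List.enumerate string.toList))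

-- ===== PRECONDITION & SPEC =====
def Spec_getBracketIndex (string : String) (out : Option (Int × Int)) : Prop := out = getBracketIndex_alt string
instance (string : String) (out : Option (Int × Int)) : Decidable (Spec_getBracketIndex string out) := by unfold Spec_getBracketIndex; infer_instance

-- ===== CLAIM (what is proved, stated in full; the proofs are below) =====
def Claim_equal_getBracketIndex : Prop := ∀ (string : String), Dom_getBracketIndex string → Spec_getBracketIndex string (getBracketIndex string)

-- ===== LEMMAS AND PROOFS =====

-- signed balance of a prefix (proof-only abbreviation for A's counter)
def gbiBal (l : List Char) : Int := (l.count '(' : Int) - (l.count ')' : Int)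

-- Python str.count with a single-character needle is List.count.
theorem gbiCountGo_single (c : Char) : ∀ (l : List Char) (fuel acc : Nat), l.length ≤ fuel →
    PySem.Chars.count.go [c] fuel l acc = acc + l.count c := by
  intro l
  induction l with
  | nil => intro fuel acc _; cases fuel <;> simp [PySem.Chars.count.go]
  | cons x t ih =>
    intro fuel acc hf
    cases fuel with
    | zero => simp at hf
    | succ fuel =>
      have hft : t.length ≤ fuel := by simpa using hf
      by_cases hx : x = c
      · have hpre : ([c].isPrefixOf (x :: t)) = true := by simp [List.isPrefixOf, hx]
        simp [PySem.Chars.count.go, ih fuel (acc + 1) hft, hx]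
        omega
      · have hpre : ([c].isPrefixOf (x :: t)) = false := by
          simp [List.isPrefixOf]
          exact fun h => hx h.symm
        simp [PySem.Chars.count.go, hpre, ih fuel acc hft, hx]

theorem gbiCount_single (l : List Char) (c : Char) :
    PySem.Chars.count l [c] = l.count c := by
  have := gbiCountGo_single c l l.length 0 le_rfl
  simpa [PySem.Chars.count] using this

-- balance after one more character
theorem gbiBal_append (pre : List Char) (c : Char) :
    gbiBal (pre ++ [c]) = gbiBal pre + (if c = '(' then 1 else 0) - (if c = ')' then 1 else 0) := by
  simp [gbiBal, List.count_append, List.count_singleton]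
  split_ifs <;> simp_all <;> omega

-- Once start is set, A's remaining scan equals B's candidate loop over the remaining closers.
theorem gbiP2 (sL : List Char) : ∀ (suffix pre : List Char) (start : Int),
    sL = pre ++ suffix → start ≠ -1 →
    gbiLoopA (PySem.List.enumerate suffix (pre.length : Int)) start (gbiBal pre)
      = gbiLoopB sL start (gbiClosers (PySem.List.enumerate suffix (pre.length : Int))) := by
  intro suffix
  induction suffix with
  | nil => intro pre start _ _; simp [PySem.List.enumerate, gbiClosers, gbiLoopA, gbiLoopB]
  | cons c rest ih =>
    intro pre start hs hstart
    have hs' : sL = (pre ++ [c]) ++ rest := by simpa using hs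
    have htake : PySem.List.slice sL none (some ((pre.length : Nat) : Int)) = pre := by
      rw [PySem.List.slice_to_natCast, hs]; exact List.take_left
    rw [PySem.List.enumerate_cons]
    have H := ih (pre ++ [c]) start hs' hstart
    rw [gbiBal_append] at H
    by_cases hc : c = '('
    · simp only [hc] at H ⊢
      simp at H
      simp [gbiLoopA, gbiClosers, hstart]
      exact H
    · by_cases hr : c = ')'
      · have hcond : (PySem.Chars.count pre ['('] = PySem.Chars.count pre [')'] + 1) ↔ (gbiBal pre - 1 = 0) := by
          simp [gbiCount_single, gbiBal]; omega
        simp only [hr] at H ⊢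
        simp at H
        by_cases hz : gbiBal pre - 1 = 0
        · simp [gbiLoopA, gbiLoopB, gbiClosers, hz, htake, hcond.mpr hz, hstart]
        · have hcnt : ¬ (PySem.Chars.count pre ['('] = PySem.Chars.count pre [')'] + 1) :=
            fun h => hz (hcond.mp h)
          simp [gbiLoopA, gbiLoopB, gbiClosers, hz, htake, hcnt, hstart]
          exact H
      · simp only [if_neg hc, if_neg hr] at H
        simp at H
        simp [gbiLoopA, gbiClosers, hc, hr, hstart]
        exact H

-- Before the first '(' : A cannot return, B's candidate tests all fail, and A's start,
-- when finally set, is the global find index k.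
theorem gbiP1 (sL : List Char) : ∀ (suffix pre : List Char) (k : Int),
    sL = pre ++ suffix → '(' ∉ pre →
    ('(' ∈ suffix → ∃ m : Nat, k = (pre.length : Int) + m ∧ suffix[m]? = some '(' ∧ ∀ i < m, suffix[i]? ≠ some '(') →
    gbiLoopA (PySem.List.enumerate suffix (pre.length : Int)) (-1) (gbiBal pre)
      = gbiLoopB sL k (gbiClosers (PySem.List.enumerate suffix (pre.length : Int))) := by
  intro suffix
  induction suffix with
  | nil => intro pre k _ _ _; simp [PySem.List.enumerate, gbiClosers, gbiLoopA, gbiLoopB]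
  | cons c rest ih =>
    intro pre k hs hnp hk
    have hs' : sL = (pre ++ [c]) ++ rest := by simpa using hs
    have htake : PySem.List.slice sL none (some ((pre.length : Nat) : Int)) = pre := by
      rw [PySem.List.slice_to_natCast, hs]; exact List.take_left
    have h0 : pre.count '(' = 0 := List.count_eq_zero.mpr hnp
    rw [PySem.List.enumerate_cons]
    by_cases hc : c = '('
    · obtain ⟨m, hkm, hm0, hmin⟩ := hk (by simp [hc])
      have hm : m = 0 := by
        by_contra h
        exact hmin 0 (Nat.pos_of_ne_zero h) (by simp [hc])
      have hkval : k = ((pre.length : Nat) : Int) := by omega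
      have H := gbiP2 sL rest (pre ++ [c]) ((pre.length : Nat) : Int) hs' (by omega)
      rw [gbiBal_append] at H
      simp only [hc] at H ⊢
      simp at H
      simp [gbiLoopA, gbiClosers, hkval]
      exact H
    · have hnp' : '(' ∉ pre ++ [c] := by
        simp [hnp]
        exact fun h => hc h.symm
      have hk' : '(' ∈ rest → ∃ m : Nat, k = (((pre ++ [c]).length : Nat) : Int) + m ∧ rest[m]? = some '(' ∧ ∀ i < m, rest[i]? ≠ some '(' := by
        intro hmem
        obtain ⟨m, hkm, hm0, hmin⟩ := hk (by simp [hmem])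
        cases m with
        | zero =>
          simp at hm0
          exact absurd hm0 hc
        | succ m' =>
          refine ⟨m', by simp only [List.length_append, List.length_cons, List.length_nil]; push_cast; omega, by simpa using hm0, ?_⟩
          intro i hi
          have := hmin (i + 1) (by omega)
          simpa using this
      have H := ih (pre ++ [c]) k hs' hnp' hk'
      rw [gbiBal_append] at H
      by_cases hr : c = ')'
      · have hz : ¬ (gbiBal pre - 1 = 0) := by
          simp [gbiBal, h0]; omega
        have hcnt : ¬ (PySem.Chars.count pre ['('] = PySem.Chars.count pre [')'] + 1) := by
          simp [gbiCount_single, h0]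
        simp only [hr] at H ⊢
        simp at H
        simp [gbiLoopA, gbiLoopB, gbiClosers, hz, htake, hcnt]
        exact H
      · simp only [if_neg hc, if_neg hr] at H
        simp at H
        simp [gbiLoopA, gbiClosers, hc, hr]
        exact H

-- With no '(' anywhere, A's loop never returns.
theorem gbiLoopA_none : ∀ (l : List (Int × Char)) (s b : Int),
    (∀ p ∈ l, p.2 ≠ '(') → b ≤ 0 → gbiLoopA l s b = none := by
  intro l
  induction l with
  | nil => intro s b _ _; rfl
  | cons hd tl ih =>
    intro s b hno hb
    obtain ⟨i, c⟩ := hd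
    have hc : c ≠ '(' := hno (i, c) (by simp)
    have hno' : ∀ p ∈ tl, p.2 ≠ '(' := fun p hp => hno p (by simp [hp])
    by_cases hr : c = ')'
    · have hz : ¬ (b - 1 = 0) := by omega
      simp [gbiLoopA, hr, hz]
      exact ih s (b - 1) hno' (by omega)
    · simp [gbiLoopA, hc, hr]
      exact ih s b hno' hb

-- ===== VERDICT (by name: the statement is the Claim_ definition above) =====
theorem getBracketIndex_spec : Claim_equal_getBracketIndex := by
  intro string _
  unfold Spec_getBracketIndex getBracketIndex getBracketIndex_alt
  have hfind : PySem.Str.find string "(" = PySem.Chars.find string.toList ['('] := rfl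
  by_cases h : PySem.Str.find string "(" = -1
  · simp only [h, if_true]
    have hno : '(' ∉ string.toList := by
      have := PySem.Chars.find_eq_neg_one_iff (s := string.toList) (sub := ['(']) |>.mp (hfind ▸ h)
      exact fun hm => this ((List.singleton_infix_iff '(' string.toList).mpr hm)
    refine gbiLoopA_none _ _ _ ?_ (by omega)
    intro p hp
    obtain ⟨kk, hkk, rfl⟩ := (PySem.List.mem_enumerate_iff _ _ _).mp hp
    exact fun hpc => hno (hpc ▸ List.getElem_mem hkk)
  · rw [if_neg h]
    have hpos : 0 ≤ PySem.Chars.find string.toList ['('] := by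
      have := PySem.Chars.neg_one_le_find (s := string.toList) (sub := ['('])
      rw [hfind] at h; omega
    obtain ⟨hp, hmin⟩ := PySem.Chars.find_spec (s := string.toList) (sub := ['(']) hpos
    have hget : string.toList[(PySem.Chars.find string.toList ['(']).toNat]? = some '(' := by
      rw [← List.head?_drop]
      rcases hp with ⟨t, ht⟩
      cases hcase : string.toList.drop (PySem.Chars.find string.toList ['(']).toNat with
      | nil => rw [hcase] at ht; simp at ht
      | cons a r => rw [hcase] at ht; simp at ht ⊢; exact ht.1.symm
    have hmain := gbiP1 string.toList string.toList [] (PySem.Str.find string "(")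
      rfl (by simp) ?_
    · simpa [gbiBal] using hmain
    · intro _
      refine ⟨(PySem.Chars.find string.toList ['(']).toNat, by rw [hfind]; simp; omega, hget, ?_⟩
      intro i hi hsome
      refine hmin i hi ?_
      rw [← List.head?_drop] at hsome
      cases hcase : string.toList.drop i with
      | nil => rw [hcase] at hsome; simp at hsome
      | cons a r =>
        rw [hcase] at hsome; simp at hsome
        exact ⟨r, by simp [hsome]⟩
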